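-- pv_equiv track=rewrite | github.com/segios/problems | python-problems/longestQuasi-constantSub-sequenceSequence.py | longestQCsubSequence
-- ===== SOURCE A (Python) =====
-- from typing import List
--
-- def longestQCsubSequence(nums: List[int]) -> int:
--
--     s = sorted(nums)
--
--     maxLen = 1
--     currLen = 1
--     minNum = s[0]
--     maxNum = s[0]
--     maxNumIdx = -1
--     for i in range( 1, len(s)):
--         if s[i] - minNum <= 1:
--            currLen = currLen + 1
--            if s[i] > minNum and maxNumIdx == -1:
--               maxNum = minNum
--               maxNumIdx = i
--         else:
--             maxLen = max(maxLen, currLen)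
--             if maxNumIdx == -1:
--                 currLen = 1
--                 minNum = s[i]
--                 maxNum = s[i]
--             else:
--                 maxNum = max(s[maxNumIdx], s[i])
--                 if s[i] - s[maxNumIdx] == 1:
--                     currLen = i - maxNumIdx + 1
--                     minNum = s[maxNumIdx]
--                     maxNumIdx = i
--                 else:
--                     currLen = 1
--                     minNum = s[i]
--                     maxNumIdx = -1
--
--
--     maxLen = max(maxLen, currLen)
--
--     return maxLen
-- ===== SOURCE B (Python) =====
-- def longestQCsubSequence(nums):
--     counts = {}
--     for x in nums:
--         counts[x] = counts.get(x, 0) + 1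
--     return max(counts[v] + counts.get(v + 1, 0) for v in counts)
-- ===== Notes on version B (the rewrite author's own statement) =====
-- stated objective: simpler
-- what changed: Replaces A's sort plus index-juggling window scan by a single counting pass over a dict and one max of count(v)+count(v+1) over the distinct values; no sorting, no indices.
import Mathlib
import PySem

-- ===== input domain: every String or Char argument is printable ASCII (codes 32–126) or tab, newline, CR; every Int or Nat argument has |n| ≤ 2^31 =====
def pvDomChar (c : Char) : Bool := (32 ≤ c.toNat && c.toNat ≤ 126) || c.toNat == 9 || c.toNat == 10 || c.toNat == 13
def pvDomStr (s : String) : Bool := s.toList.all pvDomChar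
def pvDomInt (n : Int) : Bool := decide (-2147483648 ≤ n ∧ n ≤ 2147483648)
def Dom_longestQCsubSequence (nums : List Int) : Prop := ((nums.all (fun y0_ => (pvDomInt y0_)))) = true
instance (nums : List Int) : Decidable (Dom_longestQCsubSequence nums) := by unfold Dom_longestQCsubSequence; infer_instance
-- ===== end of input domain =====

-- B replaces A's sort + index-juggling window scan by one counting pass over a dict and a
-- max of count(v)+count(v+1) over the distinct values (objective: simpler; not measured faster).

-- ===== PORT A =====
-- the body of A's 'for i in range(1, len(s))' loop, step for step
def stepA (s : List Int) (st : Int × Int × Int × Int × Int) (i : Int) : Int × Int × Int × Int × Int :=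
  match st with
  | (maxLen, currLen, minNum, maxNum, maxNumIdx) =>
    if PySem.List.pyGetD s i 0 - minNum ≤ 1 then
      if PySem.List.pyGetD s i 0 > minNum ∧ maxNumIdx = -1 then
        (maxLen, currLen + 1, minNum, minNum, i)
      else
        (maxLen, currLen + 1, minNum, maxNum, maxNumIdx)
    else
      if maxNumIdx = -1 then
        (max maxLen currLen, 1, PySem.List.pyGetD s i 0, PySem.List.pyGetD s i 0, -1)
      else
        if PySem.List.pyGetD s i 0 - PySem.List.pyGetD s maxNumIdx 0 = 1 then
          (max maxLen currLen, i - maxNumIdx + 1, PySem.List.pyGetD s maxNumIdx 0,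
            max (PySem.List.pyGetD s maxNumIdx 0) (PySem.List.pyGetD s i 0), i)
        else
          (max maxLen currLen, 1, PySem.List.pyGetD s i 0,
            max (PySem.List.pyGetD s maxNumIdx 0) (PySem.List.pyGetD s i 0), -1)

-- A's loop: initialization from the first sorted element (A raises IndexError on the empty list; excluded by Pre_) and the fold
def runA (s : List Int) : Int × Int × Int × Int × Int :=
  (PySem.List.pyRange 1 (s.length : Int) 1).foldl (stepA s)
    (1, 1, PySem.List.pyGetD s 0 0, PySem.List.pyGetD s 0 0, -1)

def longestQCsubSequence (nums : List Int) : Int :=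
  max (runA (PySem.List.sorted nums (fun x => x) false)).1
      (runA (PySem.List.sorted nums (fun x => x) false)).2.1

-- ===== PORT B =====
-- the counting loop 'for x in nums: counts[x] = counts.get(x, 0) + 1'
def countsB (nums : List Int) : PySem.Dict Int Int :=
  nums.foldl (fun d x => d.insert x (d.getD x 0 + 1)) PySem.Dict.empty

def longestQCsubSequence_alt (nums : List Int) : Int :=
  match (countsB nums).keys.map (fun v => (countsB nums).getD v 0 + (countsB nums).getD (v + 1) 0) with
  | [] => 0            -- unreachable under Pre_: Python's max raises on an empty dict
  | h :: t => t.foldl max h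
-- ===== PRECONDITION & SPEC =====
-- A indexes the first element of the sorted list and B takes a max over the counter's keys: both raise on the empty list.
def Pre_longestQCsubSequence (nums : List Int) : Prop := nums ≠ []
instance (nums : List Int) : Decidable (Pre_longestQCsubSequence nums) := by unfold Pre_longestQCsubSequence; infer_instance

def pvWitness_longestQCsubSequence : List Int := [3, 4, 2, 4]

def Spec_longestQCsubSequence (nums : List Int) (out : Int) : Prop := out = longestQCsubSequence_alt nums
instance (nums : List Int) (out : Int) : Decidable (Spec_longestQCsubSequence nums out) := by unfold Spec_longestQCsubSequence; infer_instance

-- ===== CLAIM (what is proved, stated in full; the proofs are below) =====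
def Claim_equal_longestQCsubSequence : Prop := ∀ (nums : List Int), Dom_longestQCsubSequence nums → Pre_longestQCsubSequence nums → Spec_longestQCsubSequence nums (longestQCsubSequence nums)

-- ===== LEMMAS AND PROOFS =====

-- count(v) + count(v+1) in l, as an Int
def fQC (l : List Int) (w : Int) : Int := (l.count w : Int) + (l.count (w + 1) : Int)

-- r is the length of the longest quasi-constant subsequence of l (for nonempty l)
def IsAns (l : List Int) (r : Int) : Prop :=
  1 ≤ r ∧ (∀ w ∈ l, fQC l w ≤ r) ∧ (r = 1 ∨ ∃ w ∈ l, fQC l w = r)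

-- characterization of A's running maxLen: max (with floor 1) of fQC over values below v
def MB (p : List Int) (v : Int) (m : Int) : Prop :=
  1 ≤ m ∧ (∀ w ∈ p, w < v → fQC p w ≤ m) ∧ (m = 1 ∨ ∃ w ∈ p, w < v ∧ fQC p w = m)

lemma isAns_unique {l : List Int} {r₁ r₂ : Int} (h₁ : IsAns l r₁) (h₂ : IsAns l r₂) : r₁ = r₂ := by
  obtain ⟨h1a, h1b, h1c⟩ := h₁
  obtain ⟨h2a, h2b, h2c⟩ := h₂
  have le₁ : r₁ ≤ r₂ := by
    rcases h1c with h | ⟨w, hw, hfw⟩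
    · omega
    · exact hfw ▸ h2b w hw
  have le₂ : r₂ ≤ r₁ := by
    rcases h2c with h | ⟨w, hw, hfw⟩
    · omega
    · exact hfw ▸ h1b w hw
  omega

lemma fQC_perm {l₁ l₂ : List Int} (h : l₁.Perm l₂) (w : Int) : fQC l₁ w = fQC l₂ w := by
  simp [fQC, h.count_eq]

lemma isAns_perm {l₁ l₂ : List Int} (h : l₁.Perm l₂) {r : Int} (ha : IsAns l₁ r) : IsAns l₂ r := by
  obtain ⟨h1, h2, h3⟩ := ha
  refine ⟨h1, fun w hw => ?_, ?_⟩
  · rw [← fQC_perm h]; exact h2 w (h.mem_iff.mpr hw)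
  · rcases h3 with h3 | ⟨w, hw, hfw⟩
    · exact Or.inl h3
    · exact Or.inr ⟨w, h.mem_iff.mp hw, (fQC_perm h w) ▸ hfw⟩



lemma countAppInt (p : List Int) (y w : Int) :
    ((p ++ [y]).count w : Int) = (p.count w : Int) + (if w = y then 1 else 0) := by
  rw [List.count_append]
  by_cases hw : w = y
  · subst hw; simp
  · rw [List.count_eq_zero.mpr (fun hmem => hw (List.mem_singleton.mp hmem))]; simp [hw]

lemma fQC_append_ne (p : List Int) (y w : Int) (h1 : w ≠ y) (h2 : w + 1 ≠ y) :
    fQC (p ++ [y]) w = fQC p w := by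
  unfold fQC; rw [countAppInt, countAppInt]; simp [h1, h2]

lemma cnt_nonneg (p : List Int) (w : Int) : (0:Int) ≤ (p.count w : Int) := by positivity

lemma cnt_zero_of_ub (p : List Int) (v w : Int) (hub : ∀ x ∈ p, x ≤ v) (hw : v < w) :
    p.count w = 0 :=
  List.count_eq_zero.mpr (fun hmem => absurd (hub w hmem) (by omega))

lemma loopA_inv (s : List Int) (hs : s.Pairwise (· ≤ ·)) :
    ∀ (rest p : List Int) (maxLen currLen v mn mni : Int),
      s = p ++ rest →
      p ≠ [] →
      v ∈ p →
      (∀ x ∈ p, x ≤ v + 1) →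
      currLen = fQC p v →
      MB p v maxLen →
      ((mni = -1 ∧ p.count (v + 1) = 0) ∨
        (mni = (p.length : Int) - (p.count (v + 1) : Int) ∧ 0 < p.count (v + 1) ∧
          PySem.List.pyGetD s mni 0 = v + 1)) →
      (v - 1 ∈ p → v + 1 ∈ p) →
      IsAns s
        (let fin := (PySem.List.pyRange (p.length : Int) (s.length : Int) 1).foldl (stepA s)
          (maxLen, currLen, v, mn, mni);
         max fin.1 fin.2.1) := by
  intro rest
  induction rest with
  | nil =>
    intro p maxLen currLen v mn mni hsplit hpne hvmem hub hcurr hMB hmni himp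
    have hps : p = s := by rw [hsplit, List.append_nil]
    subst hps
    rw [PySem.List.pyRange_one_eq_nil (le_refl _)]
    simp only [List.foldl_nil]
    obtain ⟨hm1, hmub, hmw⟩ := hMB
    refine ⟨by simp; omega, ?_, ?_⟩
    · intro w hw
      by_cases hlt : w < v
      · have := hmub w hw hlt; omega
      · have hwub := hub w hw
        have hw2 : w = v ∨ w = v + 1 := by omega
        rcases hw2 with rfl | rfl
        · omega
        · have hz : p.count (v + 1 + 1) = 0 := cnt_zero_of_ub p (v+1) (v+1+1) hub (by omega)
          have hnn := cnt_nonneg p v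
          unfold fQC at *
          rw [hz] at *
          simp at *
          omega
    · rcases max_choice maxLen currLen with hmx | hmx
      · rw [hmx]
        rcases hmw with h1 | ⟨w, hwmem, _, hfw⟩
        · exact Or.inl h1
        · exact Or.inr ⟨w, hwmem, hfw⟩
      · rw [hmx]
        exact Or.inr ⟨v, hvmem, hcurr.symm⟩
  | cons y rest' ih =>
    intro p maxLen currLen v mn mni hsplit hpne hvmem hub hcurr hMB hmni himp
    obtain ⟨hpp, hrp, hcross⟩ := List.pairwise_append.mp (hsplit ▸ hs)
    have hyub : ∀ x ∈ p, x ≤ y := fun x hx => hcross x hx y (by simp)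
    have hvy : v ≤ y := hyub v hvmem
    have hget : PySem.List.pyGetD s (p.length : Int) 0 = y := by
      rw [PySem.List.pyGetD_natCast, hsplit, List.getD_eq_getElem?_getD,
        List.getElem?_append_right (Nat.le_refl _)]
      simp
    have hlen : (p.length : Int) < (s.length : Int) := by
      rw [hsplit]; simp
    have hsplit' : s = (p ++ [y]) ++ rest' := by rw [hsplit]; simp
    have hlen1 : (((p ++ [y]).length : Nat) : Int) = (p.length : Int) + 1 := by
      simp
    have hcntle := @List.count_le_length _ _ (v+1) p
    rw [PySem.List.pyRange_one_cons hlen]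
    simp only [List.foldl_cons, stepA, hget]
    by_cases h1 : y - v ≤ 1
    · rw [if_pos h1]
      by_cases h2 : y > v ∧ mni = -1
      · -- first v+1 in a pure-v window
        rw [if_pos h2]
        have hy : y = v + 1 := by omega
        have hc0 : p.count (v + 1) = 0 := by
          rcases hmni with ⟨_, hc⟩ | ⟨hm, hcp, _⟩
          · exact hc
          · exfalso; rw [h2.2] at hm; omega
        have hres := ih (p ++ [y]) maxLen (currLen + 1) v v (p.length : Int) hsplit'
          (by simp) (List.mem_append_left _ hvmem)
          (fun x hx => by rcases List.mem_append.mp hx with hx | hx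
                          · exact hub x hx
                          · rw [List.mem_singleton.mp hx]; omega)
          (by unfold fQC at hcurr ⊢
              rw [countAppInt, countAppInt, if_neg (show ¬ v = y by omega),
                if_pos (show v + 1 = y by omega)]
              omega)
          (by obtain ⟨hm1, hmub, hmw⟩ := hMB
              refine ⟨hm1, ?_, ?_⟩
              · intro w hw hlt
                rcases List.mem_append.mp hw with hw | hw
                · rw [fQC_append_ne p y w (by omega) (by omega)]
                  exact hmub w hw hlt
                · rw [List.mem_singleton.mp hw] at hlt; omega
              · rcases hmw with hh | ⟨w, hwmem, hwlt, hfw⟩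
                · exact Or.inl hh
                · exact Or.inr ⟨w, List.mem_append_left _ hwmem, hwlt,
                    by rw [fQC_append_ne p y w (by omega) (by omega)]; exact hfw⟩)
          (Or.inr (by
            have hca := countAppInt p y (v + 1)
            rw [if_pos (show v + 1 = y by omega)] at hca
            refine ⟨by rw [hlen1]; omega, by omega, by rw [hget]; omega⟩))
          (fun _ => by rw [hy]; exact List.mem_append_right _ (by simp))
        rw [hlen1] at hres
        exact hres
      · rw [if_neg h2]
        have hy2 : y = v ∨ y = v + 1 := by omega
        rcases hy2 with hy | hy
        · -- another copy of v; here no v+1 has been seen (sortedness)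
          have hc0 : p.count (v + 1) = 0 := by
            by_cases hcp : p.count (v+1) = 0
            · exact hcp
            · exfalso
              have : v + 1 ∈ p := List.count_pos_iff.mp (Nat.pos_of_ne_zero hcp)
              have := hyub _ this; omega
          have hmnil : mni = -1 := by
            rcases hmni with ⟨hm, _⟩ | ⟨hm, hcp, _⟩
            · exact hm
            · exfalso; rw [hc0] at hcp; omega
          have hvm1 : v - 1 ∉ p := by
            intro hmem
            have := hyub _ (himp hmem); omega
          have hres := ih (p ++ [y]) maxLen (currLen + 1) v mn mni hsplit'
            (by simp) (List.mem_append_left _ hvmem)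
            (fun x hx => by rcases List.mem_append.mp hx with hx | hx
                            · exact hub x hx
                            · rw [List.mem_singleton.mp hx]; omega)
            (by unfold fQC at hcurr ⊢
                rw [countAppInt, countAppInt, if_pos (show v = y by omega),
                  if_neg (show ¬ v + 1 = y by omega)]
                omega)
            (by obtain ⟨hm1, hmub, hmw⟩ := hMB
                refine ⟨hm1, ?_, ?_⟩
                · intro w hw hlt
                  rcases List.mem_append.mp hw with hw | hw
                  · have hwne : w + 1 ≠ y := by
                      intro hcon
                      exact hvm1 (by rw [show v - 1 = w by omega]; exact hw)
                    rw [fQC_append_ne p y w (by omega) hwne]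
                    exact hmub w hw hlt
                  · rw [List.mem_singleton.mp hw] at hlt; omega
                · rcases hmw with hh | ⟨w, hwmem, hwlt, hfw⟩
                  · exact Or.inl hh
                  · refine Or.inr ⟨w, List.mem_append_left _ hwmem, hwlt, ?_⟩
                    have hwne : w + 1 ≠ y := by
                      intro hcon
                      exact hvm1 (by rw [show v - 1 = w by omega]; exact hwmem)
                    rw [fQC_append_ne p y w (by omega) hwne]
                    exact hfw)
            (Or.inl ⟨hmnil, by
              have hca := countAppInt p y (v + 1)
              rw [if_neg (show ¬ v + 1 = y by omega)] at hca
              omega⟩)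
            (fun hmem => by
              exfalso
              rcases List.mem_append.mp hmem with hmem | hmem
              · exact hvm1 hmem
              · have := List.mem_singleton.mp hmem; omega)
          rw [hlen1] at hres
          exact hres
        · -- another v+1, window already two-valued
          have hmne : mni ≠ -1 := fun hcon => h2 ⟨by omega, hcon⟩
          rcases hmni with ⟨hm, _⟩ | ⟨hm, hcp, hsm⟩
          · exact absurd hm hmne
          have hres := ih (p ++ [y]) maxLen (currLen + 1) v mn mni hsplit'
            (by simp) (List.mem_append_left _ hvmem)
            (fun x hx => by rcases List.mem_append.mp hx with hx | hx
                            · exact hub x hx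
                            · rw [List.mem_singleton.mp hx]; omega)
            (by unfold fQC at hcurr ⊢
                rw [countAppInt, countAppInt, if_neg (show ¬ v = y by omega),
                  if_pos (show v + 1 = y by omega)]
                omega)
            (by obtain ⟨hm1, hmub, hmw⟩ := hMB
                refine ⟨hm1, ?_, ?_⟩
                · intro w hw hlt
                  rcases List.mem_append.mp hw with hw | hw
                  · rw [fQC_append_ne p y w (by omega) (by omega)]
                    exact hmub w hw hlt
                  · rw [List.mem_singleton.mp hw] at hlt; omega
                · rcases hmw with hh | ⟨w, hwmem, hwlt, hfw⟩
                  · exact Or.inl hh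
                  · exact Or.inr ⟨w, List.mem_append_left _ hwmem, hwlt,
                      by rw [fQC_append_ne p y w (by omega) (by omega)]; exact hfw⟩)
            (Or.inr (by
              have hca := countAppInt p y (v + 1)
              rw [if_pos (show v + 1 = y by omega)] at hca
              refine ⟨by rw [hlen1]; omega, by omega, hsm⟩))
            (fun _ => by
              rw [show v + 1 = y by omega]
              exact List.mem_append_right _ (by simp))
          rw [hlen1] at hres
          exact hres
    · rw [if_neg h1]
      have hyv2 : v + 2 ≤ y := by omega
      have hynp : y ∉ p := fun hmem => by have := hub y hmem; omega
      have hy1np : y + 1 ∉ p := fun hmem => by have := hub _ hmem; omega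
      by_cases h3 : mni = -1
      · -- close a single-valued window, start fresh at y
        rw [if_pos h3]
        have hc0 : p.count (v + 1) = 0 := by
          rcases hmni with ⟨_, hc⟩ | ⟨hm, hcp, _⟩
          · exact hc
          · exfalso; rw [h3] at hm; omega
        have hvp1np : v + 1 ∉ p := fun hmem => by
          have := List.count_pos_iff.mpr hmem; omega
        have hres := ih (p ++ [y]) (max maxLen currLen) 1 y y (-1) hsplit'
          (by simp) (List.mem_append_right _ (by simp))
          (fun x hx => by rcases List.mem_append.mp hx with hx | hx
                          · have := hub x hx; omega
                          · rw [List.mem_singleton.mp hx]; omega)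
          (by unfold fQC
              have hcy := List.count_eq_zero.mpr hynp
              have hcy1 := List.count_eq_zero.mpr hy1np
              rw [countAppInt, countAppInt, if_pos rfl,
                if_neg (show ¬ y + 1 = y by omega)]
              omega)
          (by obtain ⟨hm1, hmub, hmw⟩ := hMB
              refine ⟨by omega, ?_, ?_⟩
              · intro w hw hlt
                rcases List.mem_append.mp hw with hw | hw
                · have hwub := hub w hw
                  have hwne1 : w + 1 ≠ y := by
                    intro hcon
                    exact hvp1np (by rw [show v + 1 = w by omega]; exact hw)
                  rw [fQC_append_ne p y w (by omega) hwne1]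
                  by_cases hwv : w < v
                  · have := hmub w hw hwv; omega
                  · have hw2 : w = v ∨ w = v + 1 := by omega
                    rcases hw2 with rfl | rfl
                    · omega
                    · exact absurd hw hvp1np
                · rw [List.mem_singleton.mp hw] at hlt; omega
              · rcases max_choice maxLen currLen with hmx | hmx
                · rw [hmx]
                  rcases hmw with hh | ⟨w, hwmem, hwlt, hfw⟩
                  · exact Or.inl hh
                  · refine Or.inr ⟨w, List.mem_append_left _ hwmem, by have := hub w hwmem; omega, ?_⟩
                    have hwne1 : w + 1 ≠ y := by
                      intro hcon
                      exact hvp1np (by rw [show v + 1 = w by omega]; exact hwmem)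
                    rw [fQC_append_ne p y w (by omega) hwne1]
                    exact hfw
                · rw [hmx]
                  refine Or.inr ⟨v, List.mem_append_left _ hvmem, by omega, ?_⟩
                  rw [fQC_append_ne p y v (by omega) (by omega)]
                  exact hcurr.symm)
          (Or.inl ⟨rfl, by
            have hca := countAppInt p y (y + 1)
            rw [if_neg (show ¬ y + 1 = y by omega)] at hca
            have hcy1 := List.count_eq_zero.mpr hy1np
            omega⟩)
          (fun hmem => by
            exfalso
            rcases List.mem_append.mp hmem with hmem | hmem
            · have := hub _ hmem
              have : y = v + 2 := by omega
              exact hvp1np (by rw [show v + 1 = y - 1 by omega]; exact hmem)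
            · have := List.mem_singleton.mp hmem; omega)
        rw [hlen1] at hres
        exact hres
      · rw [if_neg h3]
        rcases hmni with ⟨hm, _⟩ | ⟨hm, hcp, hsm⟩
        · exact absurd hm h3
        rw [hsm]
        have hvp1mem : v + 1 ∈ p := List.count_pos_iff.mp hcp
        by_cases h4 : y - (v + 1) = 1
        · -- slide the window: it now starts at the first v+1
          rw [if_pos h4]
          have hy : y = v + 2 := by omega
          have hv2np : v + 2 ∉ p := fun hmem => by have := hub _ hmem; omega
          have hres := ih (p ++ [y]) (max maxLen currLen) ((p.length : Int) - mni + 1)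
            (v + 1) (max (v+1) y) (p.length : Int) hsplit'
            (by simp) (List.mem_append_left _ hvp1mem)
            (fun x hx => by rcases List.mem_append.mp hx with hx | hx
                            · have := hub x hx; omega
                            · rw [List.mem_singleton.mp hx]; omega)
            (by unfold fQC
                have hc2 : p.count (v + 1 + 1) = 0 :=
                  List.count_eq_zero.mpr (fun hmem => by have := hub _ hmem; omega)
                rw [countAppInt, countAppInt, if_neg (show ¬ v + 1 = y by omega),
                  if_pos (show v + 1 + 1 = y by omega)]
                omega)
            (by obtain ⟨hm1, hmub, hmw⟩ := hMB
                refine ⟨by omega, ?_, ?_⟩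
                · intro w hw hlt
                  rcases List.mem_append.mp hw with hw | hw
                  · rw [fQC_append_ne p y w (by omega) (by omega)]
                    by_cases hwv : w < v
                    · have := hmub w hw hwv; omega
                    · have : w = v := by omega
                      subst this; omega
                  · rw [List.mem_singleton.mp hw] at hlt; omega
                · rcases max_choice maxLen currLen with hmx | hmx
                  · rw [hmx]
                    rcases hmw with hh | ⟨w, hwmem, hwlt, hfw⟩
                    · exact Or.inl hh
                    · exact Or.inr ⟨w, List.mem_append_left _ hwmem, by omega,
                        by rw [fQC_append_ne p y w (by omega) (by omega)]; exact hfw⟩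
                  · rw [hmx]
                    exact Or.inr ⟨v, List.mem_append_left _ hvmem, by omega,
                      by rw [fQC_append_ne p y v (by omega) (by omega)]; exact hcurr.symm⟩)
            (Or.inr (by
              have hca := countAppInt p y (v + 1 + 1)
              rw [if_pos (show v + 1 + 1 = y by omega)] at hca
              have hc2 : p.count (v + 1 + 1) = 0 :=
                List.count_eq_zero.mpr (fun hmem => by have := hub _ hmem; omega)
              refine ⟨by rw [hlen1]; omega, by omega, by rw [hget]; omega⟩))
            (fun _ => by
              rw [show v + 1 + 1 = y by omega]
              exact List.mem_append_right _ (by simp))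
          rw [hlen1] at hres
          exact hres
        · -- gap of at least 2 even from v+1: fresh window at y
          rw [if_neg h4]
          have hy3 : v + 3 ≤ y := by omega
          have hres := ih (p ++ [y]) (max maxLen currLen) 1 y (max (v+1) y) (-1) hsplit'
            (by simp) (List.mem_append_right _ (by simp))
            (fun x hx => by rcases List.mem_append.mp hx with hx | hx
                            · have := hub x hx; omega
                            · rw [List.mem_singleton.mp hx]; omega)
            (by unfold fQC
                have hcy := List.count_eq_zero.mpr hynp
                have hcy1 := List.count_eq_zero.mpr hy1np
                rw [countAppInt, countAppInt, if_pos rfl,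
                  if_neg (show ¬ y + 1 = y by omega)]
                omega)
            (by obtain ⟨hm1, hmub, hmw⟩ := hMB
                refine ⟨by omega, ?_, ?_⟩
                · intro w hw hlt
                  rcases List.mem_append.mp hw with hw | hw
                  · have hwub := hub w hw
                    rw [fQC_append_ne p y w (by omega) (by omega)]
                    by_cases hwv : w < v
                    · have := hmub w hw hwv; omega
                    · have hw2 : w = v ∨ w = v + 1 := by omega
                      rcases hw2 with rfl | rfl
                      · omega
                      · have hz : p.count (v + 1 + 1) = 0 :=
                          cnt_zero_of_ub p (v+1) (v+1+1) hub (by omega)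
                        have hnn := cnt_nonneg p v
                        unfold fQC at *
                        rw [hz] at *
                        simp at *
                        omega
                  · rw [List.mem_singleton.mp hw] at hlt; omega
                · rcases max_choice maxLen currLen with hmx | hmx
                  · rw [hmx]
                    rcases hmw with hh | ⟨w, hwmem, hwlt, hfw⟩
                    · exact Or.inl hh
                    · exact Or.inr ⟨w, List.mem_append_left _ hwmem,
                        by have := hub w hwmem; omega,
                        by rw [fQC_append_ne p y w (by omega) (by omega)]; exact hfw⟩
                  · rw [hmx]
                    exact Or.inr ⟨v, List.mem_append_left _ hvmem, by omega,
                      by rw [fQC_append_ne p y v (by omega) (by omega)]; exact hcurr.symm⟩)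
            (Or.inl ⟨rfl, by
              have hca := countAppInt p y (y + 1)
              rw [if_neg (show ¬ y + 1 = y by omega)] at hca
              have hcy1 := List.count_eq_zero.mpr hy1np
              omega⟩)
            (fun hmem => by
              exfalso
              rcases List.mem_append.mp hmem with hmem | hmem
              · have := hub _ hmem; omega
              · have := List.mem_singleton.mp hmem; omega)
          rw [hlen1] at hres
          exact hres

lemma B_isAns (nums : List Int) (h : nums ≠ []) : IsAns nums (longestQCsubSequence_alt nums) := by
  unfold longestQCsubSequence_alt
  have hkeys : (countsB nums).keys = PySem.Set.ofList nums := by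
    unfold countsB; rw [PySem.Dict.keys_foldl_insert]; rfl
  have hgetD : ∀ v, (countsB nums).getD v 0 = (nums.count v : Int) := by
    intro v
    unfold countsB
    rw [PySem.Dict.getD_foldl_insert_add_one]
    simp [PySem.Dict.getD_empty]
  have hmap : (PySem.Set.ofList nums).map
      (fun v => (countsB nums).getD v 0 + (countsB nums).getD (v + 1) 0)
      = (PySem.Set.ofList nums).map (fQC nums) := by
    apply List.map_congr_left
    intro v _
    simp [hgetD, fQC]
  rw [hkeys, hmap]
  obtain ⟨x, xs, hx⟩ : ∃ x xs, nums = x :: xs := by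
    cases nums with
    | nil => exact absurd rfl h
    | cons a t => exact ⟨a, t, rfl⟩
  have hne : PySem.Set.ofList nums ≠ [] := by
    intro hnil
    have : x ∈ PySem.Set.ofList nums := by
      rw [PySem.Set.mem_ofList]; simp [hx]
    simp [hnil] at this
  obtain ⟨k0, kt, hof⟩ : ∃ k0 kt, PySem.Set.ofList nums = k0 :: kt := by
    cases hh : PySem.Set.ofList nums with
    | nil => exact absurd hh hne
    | cons a t => exact ⟨a, t, rfl⟩
  have hmem : ∀ w, w ∈ k0 :: kt ↔ w ∈ nums := by
    intro w; rw [← hof, PySem.Set.mem_ofList]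
  rw [hof]
  simp only [List.map_cons]
  have hbound := PySem.List.le_foldl_max ((kt.map (fQC nums))) (fQC nums k0)
  have hmm := PySem.List.foldl_max_mem ((kt.map (fQC nums))) (fQC nums k0)
  have hf1 : ∀ w ∈ nums, 1 ≤ fQC nums w := by
    intro w hw
    have : 0 < nums.count w := List.count_pos_iff.mpr hw
    have h2 : (0:Int) ≤ (nums.count (w+1) : Int) := by positivity
    unfold fQC; omega
  refine ⟨?_, ?_, ?_⟩
  · have := hf1 k0 ((hmem k0).mp (by simp))
    omega
  · intro w hw
    rcases List.mem_cons.mp ((hmem w).mpr hw) with h0 | hmemkt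
    · exact h0 ▸ hbound.1
    · exact hbound.2 _ (List.mem_map_of_mem hmemkt)
  · right
    rcases hmm with heq | hmemmap
    · exact ⟨k0, (hmem k0).mp (by simp), heq.symm⟩
    · obtain ⟨w, hwkt, hwe⟩ := List.mem_map.mp hmemmap
      exact ⟨w, (hmem w).mp (List.mem_cons_of_mem _ hwkt), hwe⟩

lemma A_isAns (nums : List Int) (h : nums ≠ []) : IsAns nums (longestQCsubSequence nums) := by
  have hperm := PySem.List.sorted_perm nums (fun x => x) false
  have hpair := PySem.List.sorted_pairwise nums (fun x => x)
  obtain ⟨s0, tail, hseq⟩ : ∃ s0 tail, PySem.List.sorted nums (fun x => x) false = s0 :: tail := by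
    cases hh : PySem.List.sorted nums (fun x => x) false with
    | nil =>
      have := PySem.List.sorted_eq_nil_iff (xs := nums) (key := fun x => x) (rev := false)
      exact absurd (this.mp hh) h
    | cons a t => exact ⟨a, t, rfl⟩
  apply isAns_perm (hseq ▸ hperm)
  have h2 : (s0 :: tail).count (s0 + 1) = [s0].count (s0 + 1) + tail.count (s0+1) := by
    rw [show (s0 :: tail) = [s0] ++ tail from rfl, List.count_append]
  have hc1 : [s0].count (s0 + 1) = 0 :=
    List.count_eq_zero.mpr (fun hm => by have := List.mem_singleton.mp hm; omega)
  have key := loopA_inv (s0 :: tail) (hseq ▸ hpair) tail [s0] 1 1 s0 s0 (-1) rfl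
    (by simp) (by simp)
    (fun x hx => by rw [List.mem_singleton.mp hx]; omega)
    (by unfold fQC; rw [hc1]; simp)
    (⟨le_refl 1, fun w hw hlt => absurd (List.mem_singleton.mp hw ▸ hlt) (lt_irrefl s0),
      Or.inl rfl⟩)
    (Or.inl ⟨rfl, hc1⟩)
    (fun hm => absurd (List.mem_singleton.mp hm) (by omega))
  simp only [List.length_cons] at key
  unfold longestQCsubSequence runA
  rw [hseq]
  have hget0 : PySem.List.pyGetD (s0 :: tail) 0 0 = s0 := by simp [PySem.List.pyGetD]
  rw [hget0]
  exact key

-- ===== VERDICT (by name: the statement is the Claim_ definition above) =====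
theorem longestQCsubSequence_spec : Claim_equal_longestQCsubSequence := by
  intro nums _ hpre
  unfold Spec_longestQCsubSequence
  exact isAns_unique (A_isAns nums hpre) (B_isAns nums hpre)
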